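/- GENERATED by tools/from_farm_form.py from prooffarm-gif/accepted/DGifGetRecordType.2/Lemmas.lean (a worked proof of the farm's unit `DGifGetRecordType.2`,
   accepted by the verdict) — do not edit. -/
import Gif.Spec.Units.DGifGetRecordType_2
import Gif.Spec.AllSegs

/-!
  Lemmas for the unit `DGifGetRecordType.2` (0x108c3e … 0x108cb8, 27 instructions; dgif_lib.c:342-358): the `switch (Buf)` of
  `DGifGetRecordType`, a body segment of a protected function without a call but with five check sites.

      rt2_store_out    a store through an OUT-POINTER (`*Type`: a stack object of a caller) keeps `HeapInv` ∧ `GifOK` ∧ `rem`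
      rt2_done_ok      the exit assertion `Done` of a GIF_OK arm (`*Type` = 2, 3, 4), from the arm's two stores
      rt2_done_err     the exit assertion `Done` of the `default` arm (`*Type = 0`, `gif.Error = 107`, `ebx = 0`), from its four stores
      rt2_seg          0x108c3e … 0x108bf5 (all four arms, one walk): `AfterRead` → `Done`

  The general lemmas are those of Gif/Spec/FrameCarry.lean §5 (`store_stack`, `store_gif`) and Gif/Spec/Carry.lean §3-4.
-/

open X86 X86.User Asan ProgX.Base ProgX.Base.Spec Gif.Spec

set_option maxRecDepth 4000
set_option maxHeartbeats 4000000

namespace Gif.Spec.DGifGetRecordType_2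

/-- **A store through an out-pointer** (`*Type = …`: `[b, b + n)` is a stack object of a caller, `OutPtr`) keeps the heap's
invariant, the state invariant and the reader's measure: the window lies below the heap's region, and it is loose (hence off the
cursor). The frame list of the `OutPtr` (the entry's) need not be the invariant's (the body's). -/
theorem rt2_store_out {H : Heap} {rest : List Obj} {frames frames' : List (Nat × FrameLayout)} {F : Forest} {R : Rd} {top : Nat}
    {mem : Mem} {b n : Nat} (hinv : HeapInv H rest frames top mem) (hok : GifOK H F R mem)
    (hcur : 0x700000 ≤ R.cur ∧ R.cur + 16 ≤ 0x800000) (hbase : H.base = 0x800000)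
    (hout : OutPtr H rest frames' F R b n) (a : Word) (k val : Nat)
    (h1 : b ≤ a.toNat) (h2 : a.toNat + k ≤ b + n) :
    HeapInv H rest frames top (mem.writeLE a k val) ∧ GifOK H F R (mem.writeLE a k val) ∧
      rem R (mem.writeLE a k val) = rem R mem := by
  have hlow := hout.low
  have hhigh := hout.buf.high
  have hs : Mem.SameExcept [⟨b, b + n⟩] mem (mem.writeLE a k val) :=
    Mem.SameExcept.writeLE _ mem a k val (by omega) ⟨_, List.mem_cons_self, h1, h2⟩
  have hl : ∀ w, w ∈ [(⟨b, b + n⟩ : Span)] → Loose H F R w := by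
    intro w hw'
    have e := List.mem_singleton.mp hw'
    rw [e]
    exact hout.buf.loose
  refine ⟨hinv.writeLE_out a k val (by omega) (Or.inl (by omega)) (Or.inl (by omega)), ?_, ?_⟩
  · exact hok.sameExcept hinv.heap hcur hs hl
  · exact rem_loose hs hl hinv.heap (hok.owns.placed hinv.heap) hcur

/-- **The exit assertion of a GIF_OK arm** (`case ',' / '!' / ';'`: dgif_lib.c:344, 347, 350): since `AfterRead` at `v` the machine
pushed the return address `ra` of the check call (below the frame) and stored `*Type = val`, `val` one of 2, 3, 4; `rbx` (still 1) and
the registers of `Body` were not written. `s` is the state at 108BF5H. -/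
theorem rt2_done_ok (Lay : Layout) (hLay : Lay.hi = 0x1000000) {H : Heap} {rest : List Obj} {frames : List (Nat × FrameLayout)} {F : Forest} {R : Rd} {u₀ e : State}
    {ret : Word} {v s : State} (hat : DGifGetRecordType.AfterRead H rest frames F R u₀ e ret v) (ra val : Nat)
    (hval : val = 2 ∨ val = 3 ∨ val = 4)
    (h_rip : s.rip = Gif.L.DGifGetRecordType.at_108bf5)
    (h_rsp : s.reg .rsp = e.reg .rsp - 104)
    (h_kept : RegsKept [.rdi, .rax, .rsp, .rcx, .rdx] v s)
    (h_mem : s.mem = (v.mem.writeLE (e.reg .rsp - 112) 8 ra).writeLE (e.reg .rsi) 4 val)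
    (h_eq : Mem.EqOn ProgX.Base.L.textLo ProgX.Base.L.textHi u₀.mem s.mem)
    (h_df : s.flags .df = false)
    (h_mx : s.mxcsr = v.mxcsr) :
    DGifGetRecordType.Done H rest frames F R u₀ e ret s := by
  obtain ⟨hbody, hrbx, hrem_eq⟩ := hat
  have he := hbody.entry
  v_entry he
  obtain ⟨henv, hrdi, hout⟩ := hbody.pre
  have habove := hbody.type_above
  have hmx := (show abiInv _ from hbody.abi).2
  have k_r13 : v.mem.readLE (e.reg .rsp - 8) 8 = (e.reg .r13).toNat := hbody.slot_r13
  have k_r12 : v.mem.readLE (e.reg .rsp - 16) 8 = (e.reg .r12).toNat := hbody.slot_r12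
  have k_rbp : v.mem.readLE (e.reg .rsp - 24) 8 = (e.reg .rbp).toNat := hbody.slot_rbp
  have k_rbx : v.mem.readLE (e.reg .rsp - 32) 8 = (e.reg .rbx).toNat := hbody.slot_rbx
  have k_ra : UInt64.ofNat (v.mem.readLE (e.reg .rsp) 8) = ret := hbody.slot_ra
  have hsame : Mem.SameExcept
    [⟨(e.reg .rsp).toNat - 288, (e.reg .rsp).toNat⟩,
     shadowSpan ((e.reg .rsp).toNat - 104) ((e.reg .rsp).toNat - 40),
     ⟨(e.reg .rsi).toNat, (e.reg .rsi).toNat + 4⟩,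
     ⟨F.gif + 96, F.gif + 100⟩,
     ⟨R.cur, R.cur + 8⟩] e.mem v.mem := hbody.same
  have hcur := henv.ctx.cursor_range henv.heap.inv.shadow
  have hbase := henv.heap.base
  have hlow := hout.low
  have hhigh := hout.buf.high
  clear he_align
  -- the two stores since `v`: the check call's return address (stack), then `*Type` (the out-pointer)
  obtain ⟨hinvA, hokA, hremA⟩ := store_stack hbody.inv hbody.ok ⟨hcur.1, hcur.2.1⟩ (e.reg .rsp - 112) 8 ra
    (by u_omega) (by u_omega)
  obtain ⟨hinvB, hokB, hremB⟩ := rt2_store_out hinvA hokA ⟨hcur.1, hcur.2.1⟩ hbase hout (e.reg .rsi) 4 val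
    (Nat.le_refl _) (Nat.le_refl _)
  rw [← h_mem] at hinvB hokB hremB
  have hremF : rem R s.mem = rem R v.mem := hremB.trans hremA
  have hrbx' : (s.reg .rbx).toNat = 1 := by
    rw [h_kept.get .rbx rfl]
    exact hrbx
  -- THE EXIT ASSERTION: `Body` at 0x108bf5 …
  have hbody1 : DGifGetRecordType.Body Gif.L.DGifGetRecordType.at_108bf5 H rest frames F R u₀ e ret s := {
    entry := hbody.entry
    pre := hbody.pre
    type_above := hbody.type_above
    rip := h_rip
    rsp := h_rsp
    rbp := (h_kept.get .rbp rfl).trans hbody.rbp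
    r13 := (h_kept.get .r13 rfl).trans hbody.r13
    r12 := (h_kept.get .r12 rfl).trans hbody.r12
    r14 := (h_kept.get .r14 rfl).trans hbody.r14
    r15 := (h_kept.get .r15 rfl).trans hbody.r15
    slot_r13 := by
      rw [h_mem]
      u_frame k_r13
    slot_r12 := by
      rw [h_mem]
      u_frame k_r12
    slot_rbp := by
      rw [h_mem]
      u_frame k_rbp
    slot_rbx := by
      rw [h_mem]
      u_frame k_rbx
    slot_ra := by
      rw [h_mem]
      u_frame k_ra
    inv := hinvB
    ok := hokB
    rem := by
      rw [hremF]
      exact hbody.rem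
    same := by
      rw [h_mem]
      u_same
    code := ProgX.Base.conv_code_in h_eq
    abi := by
      refine ProgX.Base.abiInv_of h_df ?_
      rw [h_mx]
      exact hmx
  }
  -- … and the results: GIF_OK in `rbx`, `*Type` is 2, 3 or 4, exactly one byte consumed
  exact {
    body := hbody1
    res := Or.inl hrbx'
    ok1 := by
      intro _
      refine ⟨?_, ?_⟩
      · rw [h_mem, rd_writeLE_same _ (e.reg .rsi) 4 val _ rfl (by decide)]
        omega
      · rw [hremF]
        exact hrem_eq
  }

/-- **The exit assertion of the `default` arm** (dgif_lib.c:353-355): since `AfterRead` at `v` the machine pushed the return address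
of the first check call, stored `*Type = 0`, pushed the return address of the second, stored `gif.Error = 107`, and set `ebx = 0`.
`s` is the state at 108BF5H. -/
theorem rt2_done_err (Lay : Layout) (hLay : Lay.hi = 0x1000000) {H : Heap} {rest : List Obj} {frames : List (Nat × FrameLayout)} {F : Forest} {R : Rd} {u₀ e : State}
    {ret : Word} {v s : State} (hat : DGifGetRecordType.AfterRead H rest frames F R u₀ e ret v) (ra1 ra2 : Nat)
    (h_rip : s.rip = Gif.L.DGifGetRecordType.at_108bf5)
    (h_rsp : s.reg .rsp = e.reg .rsp - 104)
    (h_rbx : s.reg .rbx = Word.ofBV 0#32)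
    (h_kept : RegsKept [.rbx, .rdi, .rax, .rsp, .rcx, .rdx] v s)
    (h_mem : s.mem = (((v.mem.writeLE (e.reg .rsp - 112) 8 ra1).writeLE (e.reg .rsi) 4 0).writeLE (e.reg .rsp - 112) 8
      ra2).writeLE (e.reg .rdi + 96) 4 107)
    (h_eq : Mem.EqOn ProgX.Base.L.textLo ProgX.Base.L.textHi u₀.mem s.mem)
    (h_df : s.flags .df = false)
    (h_mx : s.mxcsr = v.mxcsr) :
    DGifGetRecordType.Done H rest frames F R u₀ e ret s := by
  obtain ⟨hbody, hrbx, hrem_eq⟩ := hat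
  have he := hbody.entry
  v_entry he
  obtain ⟨henv, hrdi, hout⟩ := hbody.pre
  have habove := hbody.type_above
  have hmx := (show abiInv _ from hbody.abi).2
  have k_r13 : v.mem.readLE (e.reg .rsp - 8) 8 = (e.reg .r13).toNat := hbody.slot_r13
  have k_r12 : v.mem.readLE (e.reg .rsp - 16) 8 = (e.reg .r12).toNat := hbody.slot_r12
  have k_rbp : v.mem.readLE (e.reg .rsp - 24) 8 = (e.reg .rbp).toNat := hbody.slot_rbp
  have k_rbx : v.mem.readLE (e.reg .rsp - 32) 8 = (e.reg .rbx).toNat := hbody.slot_rbx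
  have k_ra : UInt64.ofNat (v.mem.readLE (e.reg .rsp) 8) = ret := hbody.slot_ra
  have hsame : Mem.SameExcept
    [⟨(e.reg .rsp).toNat - 288, (e.reg .rsp).toNat⟩,
     shadowSpan ((e.reg .rsp).toNat - 104) ((e.reg .rsp).toNat - 40),
     ⟨(e.reg .rsi).toNat, (e.reg .rsi).toNat + 4⟩,
     ⟨F.gif + 96, F.gif + 100⟩,
     ⟨R.cur, R.cur + 8⟩] e.mem v.mem := hbody.same
  have hcur := henv.ctx.cursor_range henv.heap.inv.shadow
  have hgin := henv.ok.owns.inside henv.heap.inv.heap (o := (F.gif, 120)) List.mem_cons_self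
  have hbase := henv.heap.base
  simp only at hgin
  rw [hbase] at hgin
  have hg1 := hgin.1
  have hg2 := hgin.2.2.2.2
  clear hgin
  have hlow := hout.low
  have hhigh := hout.buf.high
  clear he_align
  -- the four stores since `v`: a return address (stack), `*Type` (the out-pointer), a return address, `gif.Error`
  obtain ⟨hinvA, hokA, hremA⟩ := store_stack hbody.inv hbody.ok ⟨hcur.1, hcur.2.1⟩ (e.reg .rsp - 112) 8 ra1
    (by u_omega) (by u_omega)
  obtain ⟨hinvB, hokB, hremB⟩ := rt2_store_out hinvA hokA ⟨hcur.1, hcur.2.1⟩ hbase hout (e.reg .rsi) 4 0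
    (Nat.le_refl _) (Nat.le_refl _)
  obtain ⟨hinvC, hokC, hremC⟩ := store_stack hinvB hokB ⟨hcur.1, hcur.2.1⟩ (e.reg .rsp - 112) 8 ra2
    (by u_omega) (by u_omega)
  obtain ⟨hinvD, hokD, hremD⟩ := store_gif hinvC hokC ⟨hcur.1, hcur.2.1⟩ hbase (e.reg .rdi + 96) 4 107
    (Or.inr (Or.inr (by u_omega)))
  rw [← h_mem] at hinvD hokD hremD
  have hremF : rem R s.mem = rem R v.mem := ((hremD.trans hremC).trans hremB).trans hremA
  have hrbx' : (s.reg .rbx).toNat = 0 := by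
    rw [h_rbx]
    decide
  -- THE EXIT ASSERTION: `Body` at 0x108bf5 …
  have hbody1 : DGifGetRecordType.Body Gif.L.DGifGetRecordType.at_108bf5 H rest frames F R u₀ e ret s := {
    entry := hbody.entry
    pre := hbody.pre
    type_above := hbody.type_above
    rip := h_rip
    rsp := h_rsp
    rbp := (h_kept.get .rbp rfl).trans hbody.rbp
    r13 := (h_kept.get .r13 rfl).trans hbody.r13
    r12 := (h_kept.get .r12 rfl).trans hbody.r12
    r14 := (h_kept.get .r14 rfl).trans hbody.r14
    r15 := (h_kept.get .r15 rfl).trans hbody.r15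
    slot_r13 := by
      rw [h_mem]
      u_frame k_r13
    slot_r12 := by
      rw [h_mem]
      u_frame k_r12
    slot_rbp := by
      rw [h_mem]
      u_frame k_rbp
    slot_rbx := by
      rw [h_mem]
      u_frame k_rbx
    slot_ra := by
      rw [h_mem]
      u_frame k_ra
    inv := hinvD
    ok := hokD
    rem := by
      rw [hremF]
      exact hbody.rem
    same := by
      rw [h_mem]
      u_same
    code := ProgX.Base.conv_code_in h_eq
    abi := by
      refine ProgX.Base.abiInv_of h_df ?_
      rw [h_mx]
      exact hmx
  }
  -- … and the results: GIF_ERROR in `rbx`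
  exact {
    body := hbody1
    res := Or.inr hrbx'
    ok1 := by
      intro h1
      rw [hrbx'] at h1
      exact absurd h1 (by decide)
  }

/-- **108C3EH … 108BF5H** (dgif_lib.c:342-358): `switch (Buf)`; `,` `!` `;`: the checked store of `*Type` = 2, 3, 4, `ebx` still 1;
anything else: the checked stores of `*Type = 0` and `gif.Error = 107`, `ebx = 0`. -/
theorem rt2_seg (Lay : Layout) (hLay : Lay.hi = 0x1000000) (μ : Microarch) (hμ : UserX.MicroOK μ) (u₀ : State)
    (hcode : HasCodeNat Lay u₀ Gif.L.DGifGetRecordType.entry Gif.Code.code_DGifGetRecordType.nat Gif.L.DGifGetRecordType.size)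
    (H : Heap) (rest : List Obj) (frames : List (Nat × FrameLayout)) (F : Forest) (R : Rd) (e : State) (ret : Word)
    (h_asan_store4_noabort : Asan.SmallCheck Lay μ ProgX.Base.WayInv (ProgX.Base.CodeOK u₀) [.rax, .rcx, .rdx] 4
      ProgX.Base.L.__asan_store4_noabort.entry)
    (v : State) (hat : DGifGetRecordType.AfterRead H rest frames F R u₀ e ret v) :
    ReachVia Lay μ ProgX.Base.WayInv v (DGifGetRecordType.Done H rest frames F R u₀ e ret) := by
  -- THE PRELUDE: the entry assertion `AfterRead` = `Body` + `rbx = 1` + one byte consumed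
  have hat0 := hat
  obtain ⟨hbody, hrbx, hrem_eq⟩ := hat
  have he := hbody.entry
  v_entry he
  obtain ⟨henv, hrdi, hout⟩ := hbody.pre
  have habove := hbody.type_above
  have w_rip := hbody.rip
  have c_rsp : v.reg .rsp = e.reg .rsp - 104 := hbody.rsp
  have c_rbp : v.reg .rbp = e.reg .rdi := hbody.rbp
  have c_r13 : v.reg .r13 = e.reg .rsi := hbody.r13
  have w_kept : RegsKept [.rsp] v v := RegsKept.refl _ _
  have w_eq : Mem.EqOn ProgX.Base.L.textLo ProgX.Base.L.textHi u₀.mem v.mem := ProgX.Base.conv_code_eqOn hbody.code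
  have hdf := (show abiInv _ from hbody.abi).1
  have hmx := (show abiInv _ from hbody.abi).2
  have hsse := ProgX.Base.sseOK_of_abiInv hbody.abi
  -- the slots and the footprint that `Body` at the exit states again
  have k_r13 : v.mem.readLE (e.reg .rsp - 8) 8 = (e.reg .r13).toNat := hbody.slot_r13
  have k_r12 : v.mem.readLE (e.reg .rsp - 16) 8 = (e.reg .r12).toNat := hbody.slot_r12
  have k_rbp : v.mem.readLE (e.reg .rsp - 24) 8 = (e.reg .rbp).toNat := hbody.slot_rbp
  have k_rbx : v.mem.readLE (e.reg .rsp - 32) 8 = (e.reg .rbx).toNat := hbody.slot_rbx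
  have k_ra : UInt64.ofNat (v.mem.readLE (e.reg .rsp) 8) = ret := hbody.slot_ra
  have hsame : Mem.SameExcept
    [⟨(e.reg .rsp).toNat - 288, (e.reg .rsp).toNat⟩,
     shadowSpan ((e.reg .rsp).toNat - 104) ((e.reg .rsp).toNat - 40),
     ⟨(e.reg .rsi).toNat, (e.reg .rsi).toNat + 4⟩,
     ⟨F.gif + 96, F.gif + 100⟩,
     ⟨R.cur, R.cur + 8⟩] e.mem v.mem := hbody.same
  -- where the cursor, gif and `*Type` are, as numbers
  have hcur := henv.ctx.cursor_range henv.heap.inv.shadow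
  have hgin := henv.ok.owns.inside henv.heap.inv.heap (o := (F.gif, 120)) List.mem_cons_self
  have hbase := henv.heap.base
  simp only at hgin
  rw [hbase] at hgin
  have hlow := hout.low
  have hhigh := hout.buf.high
  -- gif and `*Type` are live under the body's frames: what the check goals ask
  have hgl : LiveIn (H.liveObjs ++ rest) (DGifGetRecordType.framesIn frames e) F.gif 120 :=
    hbody.ok.gif_live.liveIn rest _ (Nat.le_refl _) (Nat.le_refl _)
  have htl : LiveIn (H.liveObjs ++ rest) (DGifGetRecordType.framesIn frames e) (e.reg .rsi).toNat 4 :=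
    hout.buf.live.push_frame _
  -- THE WALK, all four arms, to the epilogue's first instruction
  u_walk hcode [hμ.vendor] until [Gif.L.DGifGetRecordType.at_108bf5] span [ProgX.Base.L.textLo, ProgX.Base.L.textHi] side (v_side)
  case check_108c7c =>
    -- dgif_lib.c:344 the store of `*Type = IMAGE_DESC_RECORD_TYPE`
    have hun : ShadowUntouched v.mem s_108c7c.mem := by v_untouched
    exact htl.accSmall hbody.inv.shadow hun _ 4 (by decide) (by u_omega) (by u_omega)
  case check_108ca6 =>
    -- dgif_lib.c:350 the store of `*Type = TERMINATE_RECORD_TYPE`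
    have hun : ShadowUntouched v.mem s_108ca6.mem := by v_untouched
    exact htl.accSmall hbody.inv.shadow hun _ 4 (by decide) (by u_omega) (by u_omega)
  case check_108c91 =>
    -- dgif_lib.c:347 the store of `*Type = EXTENSION_RECORD_TYPE`
    have hun : ShadowUntouched v.mem s_108c91.mem := by v_untouched
    exact htl.accSmall hbody.inv.shadow hun _ 4 (by decide) (by u_omega) (by u_omega)
  case check_108c52 =>
    -- dgif_lib.c:353 the store of `*Type = UNDEFINED_RECORD_TYPE`
    have hun : ShadowUntouched v.mem s_108c52.mem := by v_untouched
    exact htl.accSmall hbody.inv.shadow hun _ 4 (by decide) (by u_omega) (by u_omega)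
  case check_108c63 =>
    -- dgif_lib.c:354 the store of `gif.Error = D_GIF_ERR_WRONG_RECORD`
    have hun : ShadowUntouched v.mem s_108c63.mem := by v_untouched
    exact hgl.accSmall hbody.inv.shadow hun _ 4 (by decide) (by u_omega) (by u_omega)
  · -- 0x108bf5 FROM 0x108c89: `case ','`, `*Type = 2`
    refine ReachVia.done ?_
    refine rt2_done_ok Lay hLay hat0 1084545 2 (Or.inl rfl) w_rip w_rsp w_kept w_mem w_eq ?_ w_mxcsr
    rw [w_flags]
    exact w_df_108c7c
  · -- 0x108bf5 FROM 0x108cb3: `case ';'`, `*Type = 4`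
    refine ReachVia.done ?_
    refine rt2_done_ok Lay hLay hat0 1084587 4 (Or.inr (Or.inr rfl)) w_rip w_rsp w_kept w_mem w_eq ?_ w_mxcsr
    rw [w_flags]
    exact w_df_108ca6
  · -- 0x108bf5 FROM 0x108c9e: `case '!'`, `*Type = 3`
    refine ReachVia.done ?_
    refine rt2_done_ok Lay hLay hat0 1084566 3 (Or.inr (Or.inl rfl)) w_rip w_rsp w_kept w_mem w_eq ?_ w_mxcsr
    rw [w_flags]
    exact w_df_108c91
  · -- 0x108bf5 FROM 0x108c74: `default`, `*Type = 0`, `gif.Error = 107`, `ebx = 0`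
    refine ReachVia.done ?_
    refine rt2_done_err Lay hLay hat0 1084503 1084520 w_rip w_rsp w_rbx w_kept w_mem w_eq ?_ w_mxcsr
    rw [w_flags]
    exact w_df_108c63

end Gif.Spec.DGifGetRecordType_2
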